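-- pv_equiv track=rewrite | github.com/Cryptonaut77/activity-finder-app | activity-finder-backend/src/routes/activities.py | map_query_to_yelp_categories
-- ===== SOURCE A (Python) =====
-- def map_query_to_yelp_categories(query):
--     """
--     Map search query to Yelp event categories
--     """
--     query_lower = query.lower()
--
--     if any(word in query_lower for word in ['music', 'concert', 'festival', 'band']):
--         return 'music'
--     elif any(word in query_lower for word in ['food', 'restaurant', 'dining', 'wine', 'beer']):
--         return 'food-and-drink'
--     elif any(word in query_lower for word in ['tech', 'technology', 'programming', 'coding']):
--         return 'business'
--     elif any(word in query_lower for word in ['art', 'gallery', 'exhibition']):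
--         return 'visual-arts'
--     elif any(word in query_lower for word in ['sport', 'fitness', 'running', 'yoga']):
--         return 'sports-and-fitness'
--     else:
--         return 'other'
-- ===== SOURCE B (Python) =====
-- # B: single position-scan with min-priority aggregation — walk the lowered query
-- # once, at each index test which keywords start there (keyword -> priority dict)
-- # and keep the minimum priority matched; finally map that priority to a category.
-- _KEYWORD_PRIORITY = {
--     'music': 0, 'concert': 0, 'festival': 0, 'band': 0,
--     'food': 1, 'restaurant': 1, 'dining': 1, 'wine': 1, 'beer': 1,
--     'tech': 2, 'technology': 2, 'programming': 2, 'coding': 2,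
--     'art': 3, 'gallery': 3, 'exhibition': 3,
--     'sport': 4, 'fitness': 4, 'running': 4, 'yoga': 4,
-- }
-- _CATS = ['music', 'food-and-drink', 'business', 'visual-arts', 'sports-and-fitness']
--
-- def map_query_to_yelp_categories(query):
--     q = query.lower()
--     best = 5
--     for i in range(len(q)):
--         for kw, p in _KEYWORD_PRIORITY.items():
--             if p < best and q.startswith(kw, i):
--                 best = p
--     return _CATS[best] if best < 5 else 'other'
-- ===== Notes on version B (the rewrite author's own statement) =====
-- stated objective: alternative
-- what changed: Replaced the elif cascade of substring searches with a single position-scan over the lowered query that aggregates the minimum priority of any keyword starting at each index (keyword->priority dict) and maps that minimum to a category.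
import Mathlib
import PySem

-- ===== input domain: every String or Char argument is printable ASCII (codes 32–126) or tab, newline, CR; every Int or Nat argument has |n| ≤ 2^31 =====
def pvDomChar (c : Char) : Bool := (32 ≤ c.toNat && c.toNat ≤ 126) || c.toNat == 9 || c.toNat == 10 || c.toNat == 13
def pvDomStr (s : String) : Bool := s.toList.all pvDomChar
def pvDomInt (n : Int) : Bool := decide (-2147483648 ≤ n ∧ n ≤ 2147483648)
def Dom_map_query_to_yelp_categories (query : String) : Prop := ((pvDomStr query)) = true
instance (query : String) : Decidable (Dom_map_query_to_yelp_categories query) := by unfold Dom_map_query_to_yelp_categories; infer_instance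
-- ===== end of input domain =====

-- B replaces A's elif cascade of substring searches by one position-scan over the
-- lowered query that keeps the minimum priority of any keyword starting at each
-- index (alternative decomposition, same cost).

-- ===== PORT A =====
def map_query_to_yelp_categories (query : String) : String :=
  let query_lower := PySem.Str.lower query
  if ["music", "concert", "festival", "band"].any (fun word => PySem.Str.isIn word query_lower) then
    "music"
  else if ["food", "restaurant", "dining", "wine", "beer"].any (fun word => PySem.Str.isIn word query_lower) then
    "food-and-drink"
  else if ["tech", "technology", "programming", "coding"].any (fun word => PySem.Str.isIn word query_lower) then
    "business"
  else if ["art", "gallery", "exhibition"].any (fun word => PySem.Str.isIn word query_lower) then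
    "visual-arts"
  else if ["sport", "fitness", "running", "yoga"].any (fun word => PySem.Str.isIn word query_lower) then
    "sports-and-fitness"
  else
    "other"

-- ===== PORT B =====
-- the _KEYWORD_PRIORITY dict, in insertion order
def yelpKeywordPriority : List (String × Nat) :=
  [ ("music", 0), ("concert", 0), ("festival", 0), ("band", 0),
    ("food", 1), ("restaurant", 1), ("dining", 1), ("wine", 1), ("beer", 1),
    ("tech", 2), ("technology", 2), ("programming", 2), ("coding", 2),
    ("art", 3), ("gallery", 3), ("exhibition", 3),
    ("sport", 4), ("fitness", 4), ("running", 4), ("yoga", 4) ]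

def yelpCats : List String :=
  ["music", "food-and-drink", "business", "visual-arts", "sports-and-fitness"]

-- exact port of Python's q.startswith(kw, i) for 0 ≤ i ≤ len(q)
def yelpStartsWithAt (q : List Char) (kw : String) (i : Nat) : Bool :=
  kw.toList.isPrefixOf (q.drop i)

def map_query_to_yelp_categories_alt (query : String) : String :=
  let q := PySem.Chars.lower query.toList
  let best := (List.range q.length).foldl
    (fun best i => yelpKeywordPriority.foldl
      (fun best kp => if kp.2 < best && yelpStartsWithAt q kp.1 i then kp.2 else best) best) 5
  if best < 5 then yelpCats.getD best "other" else "other"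

-- ===== PRECONDITION & SPEC =====
def Spec_map_query_to_yelp_categories (query : String) (out : String) : Prop := out = map_query_to_yelp_categories_alt query
instance (query : String) (out : String) : Decidable (Spec_map_query_to_yelp_categories query out) := by unfold Spec_map_query_to_yelp_categories; infer_instance

-- ===== CLAIM (what is proved, stated in full; the proofs are below) =====
def Claim_equal_map_query_to_yelp_categories : Prop := ∀ (query : String), Dom_map_query_to_yelp_categories query → Spec_map_query_to_yelp_categories query (map_query_to_yelp_categories query)

-- ===== LEMMAS AND PROOFS =====

-- A's keyword groups, by priority
def yelpGroup : Nat → List String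
  | 0 => ["music", "concert", "festival", "band"]
  | 1 => ["food", "restaurant", "dining", "wine", "beer"]
  | 2 => ["tech", "technology", "programming", "coding"]
  | 3 => ["art", "gallery", "exhibition"]
  | 4 => ["sport", "fitness", "running", "yoga"]
  | _ => []

def yelpCond (ql : String) (p : Nat) : Bool := (yelpGroup p).any (fun w => PySem.Str.isIn w ql)

lemma yelpKP_sound : ∀ kp ∈ yelpKeywordPriority, kp.2 < 5 ∧ kp.1 ∈ yelpGroup kp.2 ∧ kp.1.toList ≠ [] := by
  decide

lemma yelpKP_complete : ∀ p, p < 5 → ∀ w ∈ yelpGroup p, (w, p) ∈ yelpKeywordPriority := by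
  decide

-- generic min-with-guard fold lemmas (the inner loop of B)
lemma fold_min_le_init {α : Type} (l : List α) (Q : α → Bool) (v : α → Nat) (b : Nat) :
    l.foldl (fun best x => if v x < best && Q x then v x else best) b ≤ b := by
  induction l generalizing b with
  | nil => simp
  | cons y t ih =>
      simp only [List.foldl_cons]
      by_cases hc : (v y < b && Q y) = true
      · rw [if_pos hc]
        have hv : v y < b := by simpa using (Bool.and_eq_true_iff.mp hc).1
        exact le_trans (ih _) (le_of_lt hv)
      · rw [if_neg hc]; exact ih b

lemma fold_min_le {α : Type} (l : List α) (Q : α → Bool) (v : α → Nat) (b : Nat)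
    (x : α) (hx : x ∈ l) (hQ : Q x = true) :
    l.foldl (fun best x => if v x < best && Q x then v x else best) b ≤ v x := by
  induction l generalizing b with
  | nil => cases hx
  | cons y t ih =>
      simp only [List.foldl_cons]
      rcases List.mem_cons.1 hx with rfl | hx'
      · by_cases hc : (v x < b && Q x) = true
        · rw [if_pos hc]; exact fold_min_le_init t Q v (v x)
        · rw [if_neg hc]
          have hv : ¬ v x < b := fun h => hc (by simp [h, hQ])
          exact le_trans (fold_min_le_init t Q v b) (by omega)
      · exact ih _ hx'

lemma fold_min_cases {α : Type} (l : List α) (Q : α → Bool) (v : α → Nat) (b : Nat) :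
    l.foldl (fun best x => if v x < best && Q x then v x else best) b = b ∨
      ∃ x ∈ l, Q x = true ∧ l.foldl (fun best x => if v x < best && Q x then v x else best) b = v x := by
  induction l generalizing b with
  | nil => left; rfl
  | cons y t ih =>
      simp only [List.foldl_cons]
      by_cases hc : (v y < b && Q y) = true
      · rw [if_pos hc]
        rcases ih (v y) with h | ⟨x, hx, hQx, hres⟩
        · right; exact ⟨y, by simp, (Bool.and_eq_true_iff.mp hc).2, h⟩
        · right; exact ⟨x, by simp [hx], hQx, hres⟩
      · rw [if_neg hc]
        rcases ih b with h | ⟨x, hx, hQx, hres⟩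
        · left; exact h
        · right; exact ⟨x, by simp [hx], hQx, hres⟩

-- the same three facts for the double fold (B's two nested loops)
lemma dfold_le_init {α β : Type} (l₁ : List β) (l₂ : List α) (Q : β → α → Bool) (v : α → Nat) (b : Nat) :
    l₁.foldl (fun b i => l₂.foldl (fun best x => if v x < best && Q i x then v x else best) b) b ≤ b := by
  induction l₁ generalizing b with
  | nil => simp
  | cons j t ih =>
      simp only [List.foldl_cons]
      exact le_trans (ih _) (fold_min_le_init l₂ (Q j) v b)

lemma dfold_le {α β : Type} (l₁ : List β) (l₂ : List α) (Q : β → α → Bool) (v : α → Nat) (b : Nat)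
    (i : β) (hi : i ∈ l₁) (x : α) (hx : x ∈ l₂) (hQ : Q i x = true) :
    l₁.foldl (fun b i => l₂.foldl (fun best x => if v x < best && Q i x then v x else best) b) b ≤ v x := by
  induction l₁ generalizing b with
  | nil => cases hi
  | cons j t ih =>
      simp only [List.foldl_cons]
      rcases List.mem_cons.1 hi with rfl | hi'
      · exact le_trans (dfold_le_init t l₂ Q v _) (fold_min_le l₂ (Q i) v b x hx hQ)
      · exact ih _ hi'

lemma dfold_cases {α β : Type} (l₁ : List β) (l₂ : List α) (Q : β → α → Bool) (v : α → Nat) (b : Nat) :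
    l₁.foldl (fun b i => l₂.foldl (fun best x => if v x < best && Q i x then v x else best) b) b = b ∨
      ∃ i ∈ l₁, ∃ x ∈ l₂, Q i x = true ∧
        l₁.foldl (fun b i => l₂.foldl (fun best x => if v x < best && Q i x then v x else best) b) b = v x := by
  induction l₁ generalizing b with
  | nil => left; rfl
  | cons j t ih =>
      simp only [List.foldl_cons]
      rcases ih (l₂.foldl (fun best x => if v x < best && Q j x then v x else best) b) with h | ⟨i, hi, x, hx, hQx, hres⟩
      · rcases fold_min_cases l₂ (Q j) v b with h2 | ⟨x, hx, hQx, h2⟩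
        · left; rw [h, h2]
        · right; exact ⟨j, by simp, x, hx, hQx, by rw [h, h2]⟩
      · right; exact ⟨i, by simp [hi], x, hx, hQx, hres⟩

-- B's aggregated minimum, named for the proofs
def yelpBest (query : String) : Nat :=
  (List.range (PySem.Chars.lower query.toList).length).foldl
    (fun best i => yelpKeywordPriority.foldl
      (fun best kp => if kp.2 < best && yelpStartsWithAt (PySem.Chars.lower query.toList) kp.1 i then kp.2 else best) best) 5

lemma alt_eq (query : String) :
    map_query_to_yelp_categories_alt query =
      if yelpBest query < 5 then yelpCats.getD (yelpBest query) "other" else "other" := rfl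

lemma A_eq (query : String) :
    map_query_to_yelp_categories query =
      if yelpCond (PySem.Str.lower query) 0 then "music"
      else if yelpCond (PySem.Str.lower query) 1 then "food-and-drink"
      else if yelpCond (PySem.Str.lower query) 2 then "business"
      else if yelpCond (PySem.Str.lower query) 3 then "visual-arts"
      else if yelpCond (PySem.Str.lower query) 4 then "sports-and-fitness"
      else "other" := rfl

-- 'kw occurs in the lowered query' ⟺ 'kw starts at some scanned position'
lemma isIn_iff_exists_pos (query : String) (kw : String) (hkw : kw.toList ≠ []) :
    PySem.Str.isIn kw (PySem.Str.lower query) = true ↔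
      ∃ i ∈ List.range (PySem.Chars.lower query.toList).length,
        yelpStartsWithAt (PySem.Chars.lower query.toList) kw i = true := by
  rw [PySem.Str.isIn_iff_infix]
  have hq : (PySem.Str.lower query).toList = PySem.Chars.lower query.toList := by
    simp [PySem.Str.lower]
  rw [hq]
  rw [← PySem.Chars.isIn_iff_infix, ← PySem.Chars.exists_prefix_drop_iff_isIn]
  constructor
  · rintro ⟨j, hj⟩
    have hjlt : j < (PySem.Chars.lower query.toList).length := by
      by_contra h
      have : (PySem.Chars.lower query.toList).drop j = [] := by
        apply List.drop_eq_nil_of_le; omega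
      rw [this] at hj
      exact hkw (List.prefix_nil.mp hj)
    exact ⟨j, List.mem_range.mpr hjlt, by simpa [yelpStartsWithAt, List.isPrefixOf_iff_prefix] using hj⟩
  · rintro ⟨i, _, hi⟩
    exact ⟨i, by simpa [yelpStartsWithAt, List.isPrefixOf_iff_prefix] using hi⟩

lemma best_eq (query : String) (g : Nat) (hg5 : g ≤ 5)
    (hlt : ∀ p, p < g → yelpCond (PySem.Str.lower query) p = false)
    (hg : g < 5 → yelpCond (PySem.Str.lower query) g = true) :
    yelpBest query = g := by
  have hub : yelpBest query ≤ g := by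
    by_cases h5 : g < 5
    · have := hg h5
      rcases List.any_eq_true.mp this with ⟨w, hw, hwin⟩
      rcases (isIn_iff_exists_pos query w (yelpKP_sound (w, g) (yelpKP_complete g h5 w hw)).2.2).mp hwin
        with ⟨i, hi, hstart⟩
      exact dfold_le _ yelpKeywordPriority
        (fun i kp => yelpStartsWithAt (PySem.Chars.lower query.toList) kp.1 i)
        (fun kp => kp.2) 5 i hi (w, g) (yelpKP_complete g h5 w hw) hstart
    · have : g = 5 := by omega
      rw [this]
      exact dfold_le_init _ yelpKeywordPriority
        (fun i kp => yelpStartsWithAt (PySem.Chars.lower query.toList) kp.1 i) (fun kp => kp.2) 5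
  rcases dfold_cases (List.range (PySem.Chars.lower query.toList).length) yelpKeywordPriority
      (fun i kp => yelpStartsWithAt (PySem.Chars.lower query.toList) kp.1 i) (fun kp => kp.2) 5
    with h | ⟨i, hi, kp, hkp, hQ, hres⟩
  · have : yelpBest query = 5 := h
    omega
  · have hres' : yelpBest query = kp.2 := hres
    have hs := yelpKP_sound kp hkp
    have hcond : yelpCond (PySem.Str.lower query) kp.2 = true := by
      apply List.any_eq_true.mpr
      exact ⟨kp.1, hs.2.1, (isIn_iff_exists_pos query kp.1 hs.2.2).mpr ⟨i, hi, hQ⟩⟩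
    have : ¬ kp.2 < g := fun h => by rw [hlt kp.2 h] at hcond; cases hcond
    omega

-- ===== VERDICT (by name: the statement is the Claim_ definition above) =====
theorem map_query_to_yelp_categories_spec : Claim_equal_map_query_to_yelp_categories := by
  intro query _
  unfold Spec_map_query_to_yelp_categories
  rw [A_eq, alt_eq]
  by_cases h0 : yelpCond (PySem.Str.lower query) 0 = true
  · rw [best_eq query 0 (by omega) (by omega) (fun _ => h0)]; simp [h0, yelpCats]
  · by_cases h1 : yelpCond (PySem.Str.lower query) 1 = true
    · rw [best_eq query 1 (by omega) (fun p hp => by interval_cases p; simpa using h0) (fun _ => h1)]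
      simp [h0, h1, yelpCats]
    · by_cases h2 : yelpCond (PySem.Str.lower query) 2 = true
      · rw [best_eq query 2 (by omega)
            (fun p hp => by interval_cases p <;> simp_all) (fun _ => h2)]
        simp [h0, h1, h2, yelpCats]
      · by_cases h3 : yelpCond (PySem.Str.lower query) 3 = true
        · rw [best_eq query 3 (by omega)
              (fun p hp => by interval_cases p <;> simp_all) (fun _ => h3)]
          simp [h0, h1, h2, h3, yelpCats]
        · by_cases h4 : yelpCond (PySem.Str.lower query) 4 = true
          · rw [best_eq query 4 (by omega)
                (fun p hp => by interval_cases p <;> simp_all) (fun _ => h4)]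
            simp [h0, h1, h2, h3, h4, yelpCats]
          · rw [best_eq query 5 (by omega)
                (fun p hp => by interval_cases p <;> simp_all) (by omega)]
            simp [h0, h1, h2, h3, h4]
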